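-- pv_equiv track=rewrite | github.com/deepblue21zin/radar-DCA1000-refactor | tools/diagnostics/log_html_reports.py | _longest_contiguous_run
-- ===== SOURCE A (Python) =====
-- def _longest_contiguous_run(points: list[dict], max_gap_frames: int = 2) -> int:
--     if not points:
--         return 0
--     longest = 1
--     current = 1
--     for previous, current_point in zip(points, points[1:]):
--         frame_gap = int(current_point["frame_id"]) - int(previous["frame_id"])
--         if frame_gap <= max_gap_frames:
--             current += 1
--         else:
--             longest = max(longest, current)
--             current = 1
--     return max(longest, current)
-- ===== SOURCE B (Python) =====
-- def _longest_contiguous_run(points: list[dict], max_gap_frames: int = 2) -> int: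
--     if not points:
--         return 0
--     good = [int(b["frame_id"]) - int(a["frame_id"]) <= max_gap_frames
--             for a, b in zip(points, points[1:])]
--     # encode the adjacency flags as a bit-string, split on the bad gaps,
--     # and the answer is the longest all-good segment plus one point
--     runs = "".join("1" if g else "0" for g in good).split("0")
--     return max(len(r) for r in runs) + 1
-- ===== Notes on version B (the rewrite author's own statement) =====
-- stated objective: alternative
-- what changed: Replaces the running longest/current counter pair with a derived boolean gap-flag sequence that is encoded as a bit-string, split on bad gaps, and reduced to the longest segment length plus one.
import Mathlib
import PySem

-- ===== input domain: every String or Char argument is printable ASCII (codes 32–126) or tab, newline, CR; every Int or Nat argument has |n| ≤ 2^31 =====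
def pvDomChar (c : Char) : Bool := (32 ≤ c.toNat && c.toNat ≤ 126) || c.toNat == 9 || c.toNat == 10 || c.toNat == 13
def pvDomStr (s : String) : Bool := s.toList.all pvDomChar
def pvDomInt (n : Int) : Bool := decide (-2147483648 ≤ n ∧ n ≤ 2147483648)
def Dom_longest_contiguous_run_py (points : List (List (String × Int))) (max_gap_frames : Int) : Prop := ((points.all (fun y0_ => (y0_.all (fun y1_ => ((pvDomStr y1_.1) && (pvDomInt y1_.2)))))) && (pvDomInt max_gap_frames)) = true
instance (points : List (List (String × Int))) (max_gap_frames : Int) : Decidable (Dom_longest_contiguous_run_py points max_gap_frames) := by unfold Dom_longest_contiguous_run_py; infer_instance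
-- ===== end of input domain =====

-- ===== PORT A =====
-- B differs from A by computing adjacency flags first, encoding them as a '1'/'0' string,
-- splitting on '0' and taking the longest segment length + 1; return values agree on Pre_.
def lcrStepA (max_gap_frames : Int) (st : Int × Int)
    (pr : List (String × Int) × List (String × Int)) : Int × Int :=
  let frame_gap := (pr.2.lookup "frame_id").getD 0 - (pr.1.lookup "frame_id").getD 0
  if frame_gap ≤ max_gap_frames then (st.1, st.2 + 1) else (max st.1 st.2, 1)

def longest_contiguous_run_py (points : List (List (String × Int))) (max_gap_frames : Int) : Int :=
  if points = [] then 0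
  else
    let st := (points.zip points.tail).foldl (lcrStepA max_gap_frames) (1, 1)
    max st.1 st.2

-- ===== PORT B =====
-- Python's str.split('0'), hand-ported over the character list (always returns ≥ 1 part)
def lcrSplit0 : List Char → List (List Char)
  | [] => [[]]
  | c :: t =>
    if c = '0' then [] :: lcrSplit0 t
    else
      match lcrSplit0 t with
      | [] => [[c]]
      | h :: r => (c :: h) :: r

def longest_contiguous_run_py_alt (points : List (List (String × Int))) (max_gap_frames : Int) : Int :=
  if points = [] then 0
  else
    let good := (points.zip points.tail).map (fun pr =>
      decide ((pr.2.lookup "frame_id").getD 0 - (pr.1.lookup "frame_id").getD 0 ≤ max_gap_frames))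
    let runs := lcrSplit0 (good.map (fun g => if g then '1' else '0'))
    ((runs.map List.length).foldl max 0 : Nat) + 1

-- ===== PRECONDITION & SPEC =====
-- Pre_ excludes exactly the inputs where Python raises KeyError: two or more points and
-- some point lacking the "frame_id" key.
def Pre_longest_contiguous_run_py (points : List (List (String × Int))) (max_gap_frames : Int) : Prop :=
  points.length ≤ 1 ∨ ∀ p ∈ points, (p.lookup "frame_id").isSome

instance (points : List (List (String × Int))) (max_gap_frames : Int) : Decidable (Pre_longest_contiguous_run_py points max_gap_frames) := by unfold Pre_longest_contiguous_run_py; infer_instance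

def pvWitness_longest_contiguous_run_py : (List (List (String × Int))) × Int :=
  ([[("frame_id", 1)], [("frame_id", 3)], [("frame_id", 9)]], 2)

def Spec_longest_contiguous_run_py (points : List (List (String × Int))) (max_gap_frames : Int) (out : Int) : Prop := out = longest_contiguous_run_py_alt points max_gap_frames
instance (points : List (List (String × Int))) (max_gap_frames : Int) (out : Int) : Decidable (Spec_longest_contiguous_run_py points max_gap_frames out) := by unfold Spec_longest_contiguous_run_py; infer_instance

-- ===== CLAIM (what is proved, stated in full; the proofs are below) =====
def Claim_equal_longest_contiguous_run_py : Prop := ∀ (points : List (List (String × Int))) (max_gap_frames : Int), Dom_longest_contiguous_run_py points max_gap_frames → Pre_longest_contiguous_run_py points max_gap_frames → Spec_longest_contiguous_run_py points max_gap_frames (longest_contiguous_run_py points max_gap_frames)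

-- ===== LEMMAS AND PROOFS =====

-- A's loop, specialised to the boolean flag of each adjacent pair
def lcrStepB (st : Int × Int) (g : Bool) : Int × Int :=
  if g then (st.1, st.2 + 1) else (max st.1 st.2, 1)

theorem lcrFoldA_eq_foldB (m : Int) (prs : List (List (String × Int) × List (String × Int)))
    (st : Int × Int) :
    prs.foldl (lcrStepA m) st =
      (prs.map (fun pr =>
        decide ((pr.2.lookup "frame_id").getD 0 - (pr.1.lookup "frame_id").getD 0 ≤ m))).foldl
        lcrStepB st := by
  rw [List.foldl_map]
  induction prs generalizing st with
  | nil => rfl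
  | cons pr t ih =>
    simp only [List.foldl_cons, ih]
    congr 1
    simp [lcrStepA, lcrStepB]

theorem lcrSplit0_ne_nil (cs : List Char) : lcrSplit0 cs ≠ [] := by
  induction cs with
  | nil => simp [lcrSplit0]
  | cons c t ih =>
    unfold lcrSplit0
    split
    · simp
    · cases h : lcrSplit0 t with
      | nil => simp
      | cons a b => simp

-- run lengths of the bit-string split, at the flag level
def lcrRuns : List Bool → List Nat
  | [] => [0]
  | false :: t => 0 :: lcrRuns t
  | true :: t =>
    match lcrRuns t with
    | [] => [1]
    | n :: r => (n + 1) :: r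

theorem lcrRuns_ne_nil (gs : List Bool) : lcrRuns gs ≠ [] := by
  cases gs with
  | nil => simp [lcrRuns]
  | cons g t =>
    cases g
    · simp [lcrRuns]
    · unfold lcrRuns
      cases h : lcrRuns t <;> simp

theorem lcrSplit0_lengths (gs : List Bool) :
    (lcrSplit0 (gs.map (fun g => if g then '1' else '0'))).map List.length = lcrRuns gs := by
  induction gs with
  | nil => rfl
  | cons g t ih =>
    cases g
    · simp only [List.map_cons, if_neg Bool.false_ne_true]
      unfold lcrSplit0
      rw [if_pos rfl]
      simpa [lcrRuns] using ih
    · simp only [List.map_cons]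
      unfold lcrSplit0
      rw [if_neg (by decide)]
      cases h : lcrSplit0 (t.map (fun g => if g then '1' else '0')) with
      | nil => exact absurd h (lcrSplit0_ne_nil _)
      | cons a b =>
        rw [h] at ih
        unfold lcrRuns
        cases hr : lcrRuns t with
        | nil => exact absurd hr (lcrRuns_ne_nil t)
        | cons n r =>
          rw [hr] at ih
          simp only [List.map_cons] at ih ⊢
          obtain ⟨h1, h2⟩ := List.cons.injEq _ _ _ _ ▸ ih
          simp [h1, h2]

-- fold used on the B side over the run lengths, first run weighted by c
def lcrG (r : List Nat) (c : Int) : Int :=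
  match r with
  | [] => c
  | h :: t => t.foldl (fun (m : Int) (n : Nat) => max m ((n : Int) + 1)) ((h : Int) + c)

theorem lcrFold_max (a b : Int) (t : List Nat) :
    t.foldl (fun (m : Int) (n : Nat) => max m ((n : Int) + 1)) (max a b) =
      max a (t.foldl (fun (m : Int) (n : Nat) => max m ((n : Int) + 1)) b) := by
  induction t generalizing b with
  | nil => rfl
  | cons n t ih =>
    rw [List.foldl_cons, List.foldl_cons, max_assoc, ih]

theorem lcrFoldB_eq (gs : List Bool) (l c : Int) :
    (let st := gs.foldl lcrStepB (l, c); max st.1 st.2) = max l (lcrG (lcrRuns gs) c) := by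
  induction gs generalizing l c with
  | nil => simp [lcrRuns, lcrG]
  | cons g t ih =>
    cases g
    · show (let st := t.foldl lcrStepB (max l c, 1); max st.1 st.2) = _
      rw [ih]
      cases hr : lcrRuns t with
      | nil => exact absurd hr (lcrRuns_ne_nil t)
      | cons h tr =>
        show max (max l c) (lcrG (h :: tr) 1) = max l (lcrG (lcrRuns (false :: t)) c)
        have : lcrRuns (false :: t) = 0 :: h :: tr := by rw [lcrRuns, hr]
        rw [this]
        show _ = max l (List.foldl (fun (m : Int) (n : Nat) => max m ((n : Int) + 1)) ((0 : Int) + c) (h :: tr))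
        simp only [List.foldl_cons]
        have hc : ((0 : Int) + c) ⊔ ((h : Int) + 1) = max c ((h : Int) + 1) := by
          rw [zero_add]
        rw [hc, lcrFold_max]
        rw [max_assoc]
        rfl
    · show (let st := t.foldl lcrStepB (l, c + 1); max st.1 st.2) = _
      rw [ih]
      cases hr : lcrRuns t with
      | nil => exact absurd hr (lcrRuns_ne_nil t)
      | cons h tr =>
        have : lcrRuns (true :: t) = (h + 1) :: tr := by rw [lcrRuns, hr]
        rw [this]
        congr 1
        show lcrG (h :: tr) (c + 1) = lcrG ((h + 1) :: tr) c
        unfold lcrG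
        push_cast
        ring

theorem lcrG_eq_max_add_one (h : Nat) (t : List Nat) :
    lcrG (h :: t) 1 = ((t.foldl max h : Nat) : Int) + 1 := by
  unfold lcrG
  induction t generalizing h with
  | nil => simp
  | cons n t ih =>
    simp only [List.foldl_cons]
    rw [← ih (max h n)]
    congr 1
    push_cast
    exact max_add_add_right (a := (h : Int)) (b := (n : Int)) (c := 1)

theorem lcrG_pos (h : Nat) (t : List Nat) : 1 ≤ lcrG (h :: t) 1 := by
  rw [lcrG_eq_max_add_one]
  omega

-- ===== VERDICT (by name: the statement is the Claim_ definition above) =====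
theorem longest_contiguous_run_py_spec : Claim_equal_longest_contiguous_run_py := by
  intro points m _ _
  show longest_contiguous_run_py points m = longest_contiguous_run_py_alt points m
  unfold longest_contiguous_run_py longest_contiguous_run_py_alt
  by_cases hp : points = []
  · simp [hp]
  · rw [if_neg hp, if_neg hp]
    set gs := (points.zip points.tail).map (fun pr =>
      decide ((pr.2.lookup "frame_id").getD 0 - (pr.1.lookup "frame_id").getD 0 ≤ m)) with hgs
    rw [lcrFoldA_eq_foldB, ← hgs]
    rw [lcrFoldB_eq]
    show _ = ((((lcrSplit0 (gs.map (fun g => if g then '1' else '0'))).map List.length).foldl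
      max 0 : Nat) : Int) + 1
    rw [lcrSplit0_lengths gs]
    cases hr : lcrRuns gs with
    | nil => exact absurd hr (lcrRuns_ne_nil gs)
    | cons h t =>
      rw [max_eq_right (lcrG_pos h t), lcrG_eq_max_add_one,
        show List.foldl max 0 (h :: t) = List.foldl max h t from by simp]
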